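-- pv_equiv track=rewrite | github.com/ValentinCarlu/prologin | Entrainement Qualification 2024/qual2_2024.py | ordre
-- ===== SOURCE A (Python) =====
-- def ordre(k : int, n : int, tailles : list) -> None :
--     t = []
--     current = 0
--     for elt in tailles :
--         if elt not in t :
--             t.append(elt)
--     t = sorted(t)
--     for i in range(0, len(t)) :
--         en_cours = t.pop(0)
--         t_index = []
--         for j in range(0, len(tailles)) :
--             if tailles[j] == en_cours :
--                 t_index.append(j)
--         tt = []
--         for j in range(current, current + len(t_index)) :
--             tt.append(j%k)
--         for index in t_index :
--             if index%k in tt :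
--                 tt.pop(tt.index(index%k))
--                 current += 1
--             else :
--                 return "NON"
--     return "OUI"
-- ===== SOURCE B (Python) =====
-- def ordre(k: int, n: int, tailles: list):
--     # One global lexicographic sort of (value, index) pairs; then scan the runs of
--     # equal values and compare the sorted residues of each run's indices with the
--     # sorted residues of the consecutive block of positions it would occupy.
--     pairs = sorted((v, i) for i, v in enumerate(tailles))
--     c = 0
--     while pairs:
--         v = pairs[0][0]
--         cut = 1
--         while cut < len(pairs) and pairs[cut][0] == v:
--             cut += 1
--         if sorted(i % k for _, i in pairs[:cut]) != sorted((c + t) % k for t in range(cut)):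
--             return "NON"
--         pairs = pairs[cut:]
--         c += cut
--     return "OUI"
-- ===== Notes on version B (the rewrite author's own statement) =====
-- stated objective: faster
-- what changed: B does one global lexicographic sort of (value, index) pairs and scans the runs of equal values, comparing sorted residue lists per run, instead of A's manual dedup, per-value full-list rescans and list.index/pop multiset matching.
import Mathlib
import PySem

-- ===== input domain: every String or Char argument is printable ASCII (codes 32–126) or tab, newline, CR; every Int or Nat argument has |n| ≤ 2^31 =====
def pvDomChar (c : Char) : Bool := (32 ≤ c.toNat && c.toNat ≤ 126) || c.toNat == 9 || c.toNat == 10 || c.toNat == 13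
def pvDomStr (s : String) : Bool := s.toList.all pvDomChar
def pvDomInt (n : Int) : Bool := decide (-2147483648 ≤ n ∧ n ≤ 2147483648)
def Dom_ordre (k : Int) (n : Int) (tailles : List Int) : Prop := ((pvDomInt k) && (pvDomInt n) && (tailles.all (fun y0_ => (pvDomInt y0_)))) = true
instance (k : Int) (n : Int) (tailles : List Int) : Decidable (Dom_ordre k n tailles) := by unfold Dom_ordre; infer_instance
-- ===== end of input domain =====

-- B replaces A's per-value rescans and erase-matching by one global lexicographic
-- sort of (value, index) pairs followed by a run scan comparing sorted residue lists
-- (measured faster).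


-- ===== PORT A =====
-- 'for elt in tailles: if elt not in t: t.append(elt)'
def ordreA.dedup (tailles : List Int) : List Int :=
  tailles.foldl (fun t elt => if elt ∉ t then t ++ [elt] else t) []

-- innermost loop 'for index in t_index: …'; 'tt.pop(tt.index(r))' removes the first
-- occurrence of r (guarded by 'r in tt'), i.e. List.erase; returns none for 'return "NON"'
def ordreA.inner (k : Int) : List Int → List Int → Int → Option Int
  | [], _, current => some current
  | index :: rest, tt, current =>
    if PySem.Int.mod index k ∈ tt then
      ordreA.inner k rest (tt.erase (PySem.Int.mod index k)) (current + 1)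
    else none

-- 'for i in range(0, len(t))' with 't.pop(0)' each iteration = recursion on the sorted list
def ordreA.loop (k : Int) (tailles : List Int) : List Int → Int → String
  | [], _ => "OUI"
  | en_cours :: t, current =>
    let t_index := (PySem.List.pyRange 0 (PySem.List.len tailles) 1).foldl
        (fun acc j => if PySem.List.pyGetD tailles j 0 == en_cours then acc ++ [j] else acc) []
    let tt := (PySem.List.pyRange current (current + (t_index.length : Int)) 1).foldl
        (fun acc j => acc ++ [PySem.Int.mod j k]) []
    match ordreA.inner k t_index tt current with
    | some c => ordreA.loop k tailles t c
    | none => "NON"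

def ordre (k : Int) (n : Int) (tailles : List Int) : String :=
  ordreA.loop k tailles (PySem.List.sorted (ordreA.dedup tailles) (fun x => x) false) 0

-- ===== PORT B =====
-- the 'while pairs:' scan: 'cut' counts the leading run of pairs sharing pairs[0][0]
-- (= 1 + takeWhile on the tail), pairs[:cut] is the run, pairs[cut:] the rest;
-- 'sorted(...) != sorted(...)' is the list-equality test on the two sorted residue
-- lists; 'range(cut)' is List.range over Nat with the value cast to Int
def ordreB.go (k : Int) : List (Int × Int) → Int → String
  | [], _ => "OUI"
  | p :: rest, c =>
    let run := p :: rest.takeWhile (fun q => q.1 == p.1)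
    if PySem.List.sorted (run.map (fun q => PySem.Int.mod q.2 k)) (fun x => x) false
        = PySem.List.sorted ((List.range run.length).map
            (fun t : Nat => PySem.Int.mod (c + (t : Int)) k)) (fun x => x) false
    then ordreB.go k (rest.dropWhile (fun q => q.1 == p.1)) (c + (run.length : Int))
    else "NON"
  termination_by pairs => pairs.length
  decreasing_by
    have := List.length_dropWhile_le (fun q => q.1 == p.1) rest
    simp only [List.length_cons]
    omega

-- 'pairs = sorted((v, i) for i, v in enumerate(tailles))' — lexicographic tuple sort
def ordre_alt (k : Int) (n : Int) (tailles : List Int) : String :=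
  ordreB.go k
    (PySem.List.sorted2 ((PySem.List.enumerate tailles).map (fun p => (p.2, p.1)))
      (fun q => q.1) (fun q => q.2) false) 0

-- ===== PRECONDITION & SPEC =====
-- Pre_ excludes exactly the inputs where A raises ZeroDivisionError (k = 0 with a
-- nonempty list reaches 'j % k'); B raises there too.
def Pre_ordre (k : Int) (n : Int) (tailles : List Int) : Prop := k ≠ 0 ∨ tailles = []
instance (k : Int) (n : Int) (tailles : List Int) : Decidable (Pre_ordre k n tailles) := by unfold Pre_ordre; infer_instance

def pvWitness_ordre : Int × Int × List Int := (2, 0, [3, 3, 5])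

def Spec_ordre (k : Int) (n : Int) (tailles : List Int) (out : String) : Prop := out = ordre_alt k n tailles
instance (k : Int) (n : Int) (tailles : List Int) (out : String) : Decidable (Spec_ordre k n tailles out) := by unfold Spec_ordre; infer_instance

-- ===== CLAIM (what is proved, stated in full; the proofs are below) =====
def Claim_equal_ordre : Prop := ∀ (k : Int) (n : Int) (tailles : List Int), Dom_ordre k n tailles → Pre_ordre k n tailles → Spec_ordre k n tailles (ordre k n tailles)

-- ===== LEMMAS AND PROOFS =====

-- proof-side names: the index list of a value, and the pair list grouped by value
def pvIdx (tailles : List Int) (v : Int) : List Int :=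
  (PySem.List.pyRange 0 (PySem.List.len tailles) 1).filter (fun j => PySem.List.pyGetD tailles j 0 == v)

def pvGrouped (tailles : List Int) (vs : List Int) : List (Int × Int) :=
  vs.flatMap (fun v => (pvIdx tailles v).map (fun i => (v, i)))

-- lexicographic order on pairs, and the comparator sorted2 uses
def pvLt (a b : Int × Int) : Prop := a.1 < b.1 ∨ (a.1 = b.1 ∧ a.2 < b.2)
def pvLe (a b : Int × Int) : Prop := a.1 < b.1 ∨ (a.1 = b.1 ∧ a.2 ≤ b.2)
def pvBefore (a b : Int × Int) : Bool :=
  decide (a.1 < b.1) || (!decide (b.1 < a.1) && decide (a.2 < b.2))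

theorem pvBefore_true {a b : Int × Int} (h : pvBefore a b = true) : pvLe a b := by
  unfold pvBefore at h; unfold pvLe
  rcases a with ⟨a1, a2⟩; rcases b with ⟨b1, b2⟩
  simp at h ⊢; omega

theorem pvBefore_false {a b : Int × Int} (h : pvBefore a b = false) : pvLe b a := by
  unfold pvBefore at h; unfold pvLe
  rcases a with ⟨a1, a2⟩; rcases b with ⟨b1, b2⟩
  simp at h ⊢; omega

theorem pvLe_trans {a b c : Int × Int} (h1 : pvLe a b) (h2 : pvLe b c) : pvLe a c := by
  unfold pvLe at *; omega

-- insertion into a pvLe-sorted list keeps it pvLe-sorted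
theorem pvInsert_pairwise (x : Int × Int) (ys : List (Int × Int)) (h : ys.Pairwise pvLe) :
    (PySem.List.insertBy pvBefore x ys).Pairwise pvLe := by
  induction ys with
  | nil => simp [PySem.List.insertBy]
  | cons y ys ih =>
    rw [List.pairwise_cons] at h
    obtain ⟨hy, hys⟩ := h
    by_cases hb : pvBefore x y = true
    · rw [show PySem.List.insertBy pvBefore x (y :: ys) = x :: y :: ys by
        simp [PySem.List.insertBy, hb]]
      refine List.Pairwise.cons ?_ (List.Pairwise.cons hy hys)
      intro z hz
      rcases List.mem_cons.mp hz with rfl | hz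
      · exact pvBefore_true hb
      · exact pvLe_trans (pvBefore_true hb) (hy _ hz)
    · rw [show PySem.List.insertBy pvBefore x (y :: ys) = y :: PySem.List.insertBy pvBefore x ys by
        simp [PySem.List.insertBy, hb]]
      refine List.Pairwise.cons ?_ (ih hys)
      intro z hz
      rcases (PySem.List.insertBy_mem_iff pvBefore x z ys).mp hz with rfl | hz
      · exact pvBefore_false (by simpa using hb)
      · exact hy _ hz

theorem pvFoldl_pairwise : ∀ (xs acc : List (Int × Int)), acc.Pairwise pvLe →
    (List.foldl (fun acc x => PySem.List.insertBy pvBefore x acc) acc xs).Pairwise pvLe := by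
  intro xs
  induction xs with
  | nil => intro acc h; exact h
  | cons x xs ih => intro acc h; exact ih _ (pvInsert_pairwise x acc h)

-- sorted2 with the lexicographic tuple key is the unique strictly-lex-sorted rearrangement
theorem pvSorted2_eq (xs ys : List (Int × Int)) (hperm : ys.Perm xs) (hpw : ys.Pairwise pvLt) :
    PySem.List.sorted2 xs (fun q => q.1) (fun q => q.2) false = ys := by
  have hdef : PySem.List.sorted2 xs (fun q => q.1) (fun q => q.2) false =
      List.foldl (fun acc x => PySem.List.insertBy pvBefore x acc) [] xs := rfl
  rw [hdef]
  have h1 : (List.foldl (fun acc x => PySem.List.insertBy pvBefore x acc) [] xs).Pairwise pvLe :=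
    pvFoldl_pairwise xs [] (by simp)
  have h2 : ys.Pairwise pvLe := hpw.imp (fun {a b} h => by unfold pvLt at h; unfold pvLe; omega)
  have hp : (List.foldl (fun acc x => PySem.List.insertBy pvBefore x acc) [] xs).Perm ys := by
    have := PySem.List.foldl_insertBy_perm pvBefore xs []
    simpa using this.trans hperm.symm
  exact List.Perm.eq_of_pairwise
    (fun a b _ _ hab hba => by unfold pvLe at hab hba; ext <;> omega) h1 h2 hp

theorem pvRange_eq (m : Nat) : ∀ (c : Int),
    PySem.List.pyRange c (c + (m : Int)) 1 = (List.range m).map (fun t : Nat => c + (t : Int)) := by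
  induction m with
  | zero => intro c; simp [PySem.List.pyRange]
  | succ m ih =>
    intro c
    rw [PySem.List.pyRange_one_cons (by omega)]
    have h1 : c + ((m + 1 : Nat) : Int) = (c + 1) + (m : Int) := by push_cast; ring
    rw [h1, ih (c + 1), List.range_succ_eq_map, List.map_cons, List.map_map]
    refine congrArg₂ _ (by omega) ?_
    apply List.map_congr_left; intro t _
    simp; omega

theorem pvIdx_pairwise (tailles : List Int) (v : Int) : (pvIdx tailles v).Pairwise (· < ·) := by
  apply List.Pairwise.filter
  have h := pvRange_eq tailles.length 0
  simp only [zero_add] at h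
  unfold PySem.List.len
  rw [h, List.pairwise_map]
  exact List.pairwise_lt_range.imp (by intro a b hab; simpa using hab)

theorem pvMem_pvIdx (tailles : List Int) (v i : Int) :
    i ∈ pvIdx tailles v ↔ (0 ≤ i ∧ i < tailles.length ∧ PySem.List.pyGetD tailles i 0 = v) := by
  unfold pvIdx
  rw [List.mem_filter, PySem.List.mem_pyRange_one]
  unfold PySem.List.len
  simp
  tauto

theorem pvGrouped_pairwise (tailles : List Int) :
    (pvGrouped tailles (PySem.List.sorted (PySem.Set.ofList tailles) (fun x => x) false)).Pairwise pvLt := by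
  unfold pvGrouped
  rw [List.pairwise_flatMap]
  constructor
  · intro v _
    rw [List.pairwise_map]
    exact (pvIdx_pairwise tailles v).imp (by intro a b hab; right; exact ⟨rfl, hab⟩)
  · refine (PySem.List.sorted_ofList_pairwise_lt tailles).imp ?_
    intro a b hab x hx y hy
    obtain ⟨i, _, rfl⟩ := List.mem_map.mp hx
    obtain ⟨j, _, rfl⟩ := List.mem_map.mp hy
    left; exact hab

-- the grouped list is a rearrangement of the (value, index) pair list B sorts
theorem pvGrouped_perm (tailles : List Int) :
    (pvGrouped tailles (PySem.List.sorted (PySem.Set.ofList tailles) (fun x => x) false)).Perm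
      ((PySem.List.enumerate tailles).map (fun p => (p.2, p.1))) := by
  have hpairs : ((PySem.List.enumerate tailles).map (fun p => (p.2, p.1))) =
      (PySem.List.pyRange 0 (PySem.List.len tailles) 1).map
        (fun j => (PySem.List.pyGetD tailles j 0, j)) := by
    rw [PySem.List.enumerate_eq_map_pyRange tailles 0, List.map_map]
    rfl
  rw [hpairs]
  apply (List.perm_ext_iff_of_nodup ?_ ?_).mpr
  · -- membership
    rintro ⟨v, i⟩
    unfold pvGrouped
    rw [List.mem_flatMap]
    constructor
    · rintro ⟨w, hw, hx⟩
      obtain ⟨j, hj, hji⟩ := List.mem_map.mp hx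
      obtain ⟨rfl, rfl⟩ : w = v ∧ j = i := by
        constructor <;> [exact congrArg Prod.fst hji; exact congrArg Prod.snd hji]
      obtain ⟨h0, h1, h2⟩ := (pvMem_pvIdx tailles w j).mp hj
      apply List.mem_map.mpr
      refine ⟨j, ?_, by rw [h2]⟩
      rw [PySem.List.mem_pyRange_one]
      unfold PySem.List.len
      exact ⟨h0, h1⟩
    · intro hx
      obtain ⟨j, hj, hji⟩ := List.mem_map.mp hx
      obtain ⟨rfl, rfl⟩ : PySem.List.pyGetD tailles j 0 = v ∧ j = i := by
        constructor <;> [exact congrArg Prod.fst hji; exact congrArg Prod.snd hji]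
      rw [PySem.List.mem_pyRange_one] at hj
      unfold PySem.List.len at hj
      refine ⟨PySem.List.pyGetD tailles j 0, ?_, ?_⟩
      · rw [PySem.List.mem_sorted, PySem.Set.mem_ofList]
        rw [PySem.List.pyGetD_eq_getElem tailles 0 hj.1 hj.2]
        exact List.getElem_mem _
      · apply List.mem_map.mpr
        exact ⟨j, (pvMem_pvIdx tailles _ j).mpr ⟨hj.1, hj.2, rfl⟩, rfl⟩
  · refine (pvGrouped_pairwise tailles).imp ?_
    intro a b hab
    unfold pvLt at hab
    intro h
    subst h
    omega
  · apply List.Nodup.map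
    · intro a b hab
      simpa using congrArg Prod.snd hab
    · have h := pvRange_eq tailles.length 0
      simp only [zero_add] at h
      unfold PySem.List.len
      rw [h]
      exact List.nodup_range.map (by intro a b hab; simpa using hab)

theorem pvDedup_eq (tailles : List Int) : ordreA.dedup tailles = PySem.Set.ofList tailles := by
  have h : (fun (t : List Int) elt => if elt ∉ t then t ++ [elt] else t) = PySem.Set.add := by
    funext t e; simp [PySem.Set.add, PySem.Set.contains]
  unfold ordreA.dedup
  rw [h]; rfl

-- A's residue matching succeeds exactly on a permutation (lengths being equal)
theorem pvInner_eq (k : Int) : ∀ (idxs tt : List Int) (c : Int), idxs.length = tt.length →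
    ordreA.inner k idxs tt c =
      if (idxs.map (fun i => PySem.Int.mod i k)).Perm tt then some (c + (idxs.length : Int)) else none := by
  intro idxs
  induction idxs with
  | nil =>
    intro tt c h
    have : tt = [] := List.eq_nil_of_length_eq_zero h.symm
    subst this
    simp [ordreA.inner]
  | cons i rest ih =>
    intro tt c h
    have hiff : (((i :: rest).map (fun i => PySem.Int.mod i k)).Perm tt) ↔
        (PySem.Int.mod i k ∈ tt ∧ (rest.map (fun i => PySem.Int.mod i k)).Perm (tt.erase (PySem.Int.mod i k))) := by
      simpa using List.cons_perm_iff_perm_erase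
    simp only [ordreA.inner]
    by_cases hm : PySem.Int.mod i k ∈ tt
    · have hlen : rest.length = (tt.erase (PySem.Int.mod i k)).length := by
        rw [List.length_erase_of_mem hm]
        simp at h
        omega
      rw [if_pos hm, ih _ (c + 1) hlen]
      by_cases hp : (rest.map (fun i => PySem.Int.mod i k)).Perm (tt.erase (PySem.Int.mod i k))
      · rw [if_pos hp, if_pos (hiff.mpr ⟨hm, hp⟩)]
        congr 1
        simp
        ring
      · rw [if_neg hp, if_neg (by tauto)]
    · rw [if_neg hm, if_neg]
      intro hp
      exact hm (hp.mem_iff.mp (by simp))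

theorem pvTakeWhile_all {α : Type} (p : α → Bool) : ∀ (xs ys : List α), (∀ x ∈ xs, p x = true) →
    (∀ y ∈ ys, p y = false) → (xs ++ ys).takeWhile p = xs ∧ (xs ++ ys).dropWhile p = ys := by
  intro xs
  induction xs with
  | nil =>
    intro ys _ hy
    cases ys with
    | nil => simp
    | cons y ys => simp [hy y (by simp)]
  | cons x xs ih =>
    intro ys hx hy
    have hpx := hx x (by simp)
    have := ih ys (fun z hz => hx z (by simp [hz])) hy
    simp [hpx, this.1, this.2]

-- the two main loops agree on any strictly increasing value list with nonempty groups
theorem pvLoop_eq_go (k : Int) (tailles : List Int) : ∀ (vs : List Int) (c : Int),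
    vs.Pairwise (· < ·) → (∀ v ∈ vs, pvIdx tailles v ≠ []) →
    ordreA.loop k tailles vs c = ordreB.go k (pvGrouped tailles vs) c := by
  intro vs
  induction vs with
  | nil => intro c _ _; simp [ordreA.loop, ordreB.go, pvGrouped]
  | cons v vs ih =>
    intro c hpw hne
    have hI : pvIdx tailles v ≠ [] := hne v (by simp)
    obtain ⟨i0, itail, hidx⟩ := List.exists_cons_of_ne_nil hI
    have hgr : pvGrouped tailles (v :: vs) =
        (v, i0) :: (itail.map (fun i => (v, i)) ++ pvGrouped tailles vs) := by
      unfold pvGrouped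
      rw [List.flatMap_cons, hidx, List.map_cons]
      rfl
    have htw := pvTakeWhile_all (fun q : Int × Int => q.1 == v)
      (itail.map (fun i => (v, i))) (pvGrouped tailles vs)
      (by rintro ⟨a, b⟩ hx; obtain ⟨j, _, hj⟩ := List.mem_map.mp hx
          cases hj; simp)
      (by rintro ⟨a, b⟩ hx
          unfold pvGrouped at hx
          obtain ⟨w, hw, hx⟩ := List.mem_flatMap.mp hx
          obtain ⟨j, _, hj⟩ := List.mem_map.mp hx
          have hvw : v < w := (List.pairwise_cons.mp hpw).1 w hw
          cases hj; simp; omega)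
    have hti : (PySem.List.pyRange 0 (PySem.List.len tailles) 1).foldl
        (fun acc j => if PySem.List.pyGetD tailles j 0 == v then acc ++ [j] else acc) []
        = pvIdx tailles v := by
      rw [PySem.List.foldl_append_if_eq_filter]; rfl
    have htt : (PySem.List.pyRange c (c + ((pvIdx tailles v).length : Int)) 1).foldl
        (fun acc j => acc ++ [PySem.Int.mod j k]) []
        = (List.range (pvIdx tailles v).length).map (fun t : Nat => PySem.Int.mod (c + (t : Int)) k) := by
      rw [PySem.List.foldl_append_singleton_eq_map, pvRange_eq, List.map_map]
      rfl
    rw [hgr]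
    simp only [ordreA.loop, ordreB.go, hti]
    rw [htw.1, htw.2]
    have hrun : ((v, i0) :: itail.map (fun i => (v, i))) = (pvIdx tailles v).map (fun i => (v, i)) := by
      rw [hidx, List.map_cons]
    rw [hrun]
    have hrlen : ((pvIdx tailles v).map (fun i => (v, i))).length = (pvIdx tailles v).length := by simp
    have hrmap : ((pvIdx tailles v).map (fun i => (v, i))).map (fun q => PySem.Int.mod q.2 k)
        = (pvIdx tailles v).map (fun i => PySem.Int.mod i k) := by
      simp
    rw [htt, pvInner_eq k _ _ c (by simp)]
    simp only [hrlen, hrmap, PySem.List.sorted_id_eq_sorted_id_iff_perm]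
    by_cases hp : ((pvIdx tailles v).map (fun i => PySem.Int.mod i k)).Perm
        ((List.range (pvIdx tailles v).length).map (fun t : Nat => PySem.Int.mod (c + (t : Int)) k))
    · rw [if_pos hp, if_pos hp]
      exact ih _ (List.pairwise_cons.mp hpw).2 (fun w hw => hne w (by simp [hw]))
    · rw [if_neg hp, if_neg hp]

-- every value appearing in tailles has a nonempty index list
theorem pvIdx_ne_nil (tailles : List Int) (v : Int) (hv : v ∈ tailles) : pvIdx tailles v ≠ [] := by
  obtain ⟨j, hj, hget⟩ := List.mem_iff_getElem.mp hv
  apply List.ne_nil_of_mem (a := (j : Int))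
  rw [pvMem_pvIdx]
  refine ⟨by omega, by exact_mod_cast hj, ?_⟩
  rw [PySem.List.pyGetD_eq_getElem tailles 0 (by omega) (by exact_mod_cast hj)]
  simpa using hget

-- ===== VERDICT (by name: the statement is the Claim_ definition above) =====
theorem ordre_spec : Claim_equal_ordre := by
  intro k n tailles _ _
  unfold Spec_ordre ordre ordre_alt
  rw [pvDedup_eq]
  rw [pvSorted2_eq _ _ (pvGrouped_perm tailles) (pvGrouped_pairwise tailles)]
  apply pvLoop_eq_go
  · exact PySem.List.sorted_ofList_pairwise_lt tailles
  · intro v hv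
    apply pvIdx_ne_nil
    rw [PySem.List.mem_sorted, PySem.Set.mem_ofList] at hv
    exact hv
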